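-- pv_equiv track=rewrite | github.com/mehdiborji/slide-recon | bc_umi_utils.py | parse_read_struct
-- ===== SOURCE A (Python) =====
-- def parse_read_struct(input_string):
--     intervals_J = []
--     intervals_N = []
--     intervals_ATCG = []
--
--     current_interval_start = None
--     current_interval_type = None
--
--     for i, char in enumerate(input_string):
--         if char == "J":
--             if current_interval_type != "J":
--                 if current_interval_type == "N":
--                     intervals_N.append((current_interval_start, i))
--                 elif current_interval_type == "ATCG":
--                     intervals_ATCG.append((current_interval_start, i))
--                 current_interval_start = i
--                 current_interval_type = "J"
--         elif char == "N":
--             if current_interval_type != "N":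
--                 if current_interval_type == "J":
--                     intervals_J.append((current_interval_start, i))
--                 elif current_interval_type == "ATCG":
--                     intervals_ATCG.append((current_interval_start, i))
--                 current_interval_start = i
--                 current_interval_type = "N"
--         elif char in "ATCG":
--             if current_interval_type != "ATCG":
--                 if current_interval_type == "J":
--                     intervals_J.append((current_interval_start, i))
--                 elif current_interval_type == "N":
--                     intervals_N.append((current_interval_start, i))
--                 current_interval_start = i
--                 current_interval_type = "ATCG"
--         else:
--             if current_interval_type == "ATCG":
--                 intervals_ATCG.append((current_interval_start, i))
--             elif current_interval_type == "J":
--                 intervals_J.append((current_interval_start, i))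
--             elif current_interval_type == "N":
--                 intervals_N.append((current_interval_start, i))
--             current_interval_start = None
--             current_interval_type = None
--
--     # Check if the last interval needs to be added
--     if current_interval_type == "J":
--         intervals_J.append((current_interval_start, len(input_string)))
--     elif current_interval_type == "N":
--         intervals_N.append((current_interval_start, len(input_string)))
--     elif current_interval_type == "ATCG":
--         intervals_ATCG.append((current_interval_start, len(input_string)))
--
--     intervals_dict = {"J": intervals_J, "N": intervals_N, "ATCG": intervals_ATCG}
--
--     return intervals_dict
-- ===== SOURCE B (Python) =====
-- from itertools import groupby
--
-- def _classify(c):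
--     if c == "J":
--         return "J"
--     if c == "N":
--         return "N"
--     if c in "ATCG":
--         return "ATCG"
--     return None
--
-- def parse_read_struct(input_string):
--     intervals = {"J": [], "N": [], "ATCG": []}
--     pos = 0
--     for key, group in groupby(input_string, key=_classify):
--         end = pos + sum(1 for _ in group)
--         if key is not None:
--             intervals[key].append((pos, end))
--         pos = end
--     return intervals
-- ===== Notes on version B (the rewrite author's own statement) =====
-- stated objective: idiomatic
-- what changed: Replaces A's nine-branch per-character state machine (open-interval start/type variables plus a final flush) by a classify helper and itertools.groupby over consecutive runs, appending one closed interval per non-None run.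
import Mathlib
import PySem

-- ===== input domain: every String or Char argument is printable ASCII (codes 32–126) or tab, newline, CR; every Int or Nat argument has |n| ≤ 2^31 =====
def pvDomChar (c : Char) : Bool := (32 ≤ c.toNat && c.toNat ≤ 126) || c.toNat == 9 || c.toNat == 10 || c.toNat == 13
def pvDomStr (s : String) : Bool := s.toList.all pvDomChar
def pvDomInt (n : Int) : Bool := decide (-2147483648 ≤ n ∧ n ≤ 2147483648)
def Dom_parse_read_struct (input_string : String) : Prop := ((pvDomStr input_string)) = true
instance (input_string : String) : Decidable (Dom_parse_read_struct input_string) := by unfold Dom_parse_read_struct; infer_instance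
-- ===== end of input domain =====

-- B replaces A's nine-branch per-character state machine by a classify-and-groupby pass over runs (idiomatic decomposition; same cost).

-- ===== PORT A =====
-- A's state: the three interval lists plus the current open interval (type, start);
-- in Python current_interval_type/current_interval_start are always both None or both set, so they are one Option here.
def pvAState : Type := List (Int × Int) × List (Int × Int) × List (Int × Int) × Option (String × Int)

def pvStepA (st : pvAState) (i : Int) (c : Char) : pvAState :=
  match st with
  | (jL, nL, aL, cur) =>
    if c == 'J' then
      match cur with
      | some ("J", s) => (jL, nL, aL, some ("J", s))
      | some ("N", s) => (jL, nL ++ [(s, i)], aL, some ("J", i))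
      | some ("ATCG", s) => (jL, nL, aL ++ [(s, i)], some ("J", i))
      | _ => (jL, nL, aL, some ("J", i))
    else if c == 'N' then
      match cur with
      | some ("N", s) => (jL, nL, aL, some ("N", s))
      | some ("J", s) => (jL ++ [(s, i)], nL, aL, some ("N", i))
      | some ("ATCG", s) => (jL, nL, aL ++ [(s, i)], some ("N", i))
      | _ => (jL, nL, aL, some ("N", i))
    else if ("ATCG".toList).contains c then   -- char in "ATCG": single-char membership
      match cur with
      | some ("ATCG", s) => (jL, nL, aL, some ("ATCG", s))
      | some ("J", s) => (jL ++ [(s, i)], nL, aL, some ("ATCG", i))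
      | some ("N", s) => (jL, nL ++ [(s, i)], aL, some ("ATCG", i))
      | _ => (jL, nL, aL, some ("ATCG", i))
    else
      match cur with
      | some ("ATCG", s) => (jL, nL, aL ++ [(s, i)], none)
      | some ("J", s) => (jL ++ [(s, i)], nL, aL, none)
      | some ("N", s) => (jL, nL ++ [(s, i)], aL, none)
      | _ => (jL, nL, aL, none)

def pvLoopA (st : pvAState) (i : Int) : List Char → pvAState
  | [] => st
  | c :: cs => pvLoopA (pvStepA st i c) (i + 1) cs

-- the final "check if the last interval needs to be added" block
def pvFlushA (st : pvAState) (n : Int) : List (Int × Int) × List (Int × Int) × List (Int × Int) :=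
  match st with
  | (jL, nL, aL, some ("J", s)) => (jL ++ [(s, n)], nL, aL)
  | (jL, nL, aL, some ("N", s)) => (jL, nL ++ [(s, n)], aL)
  | (jL, nL, aL, some ("ATCG", s)) => (jL, nL, aL ++ [(s, n)])
  | (jL, nL, aL, _) => (jL, nL, aL)

def parse_read_struct (input_string : String) : List (String × List (Int × Int)) :=
  match pvFlushA (pvLoopA ([], [], [], none) 0 input_string.toList) (input_string.toList.length : Int) with
  | (jL, nL, aL) => [("J", jL), ("N", nL), ("ATCG", aL)]

-- ===== PORT B =====
def pvClassify (c : Char) : Option String :=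
  if c == 'J' then some "J"
  else if c == 'N' then some "N"
  else if ("ATCG".toList).contains c then some "ATCG"
  else none

-- itertools.groupby(input_string, key=pvClassify), each group reduced to its length
def pvRunsB : List Char → List (Option String × Nat)
  | [] => []
  | c :: cs =>
    (pvClassify c, (cs.takeWhile (fun d => pvClassify d == pvClassify c)).length + 1)
      :: pvRunsB (cs.dropWhile (fun d => pvClassify d == pvClassify c))
termination_by l => l.length
decreasing_by
  simp only [List.length_cons]
  exact Nat.lt_succ_of_le (List.length_dropWhile_le _ _)

def pvStepB (st : Int × List (Int × Int) × List (Int × Int) × List (Int × Int))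
    (r : Option String × Nat) : Int × List (Int × Int) × List (Int × Int) × List (Int × Int) :=
  match st with
  | (pos, jL, nL, aL) =>
    let e := pos + (r.2 : Int)
    match r.1 with
    | some "J" => (e, jL ++ [(pos, e)], nL, aL)
    | some "N" => (e, jL, nL ++ [(pos, e)], aL)
    | some "ATCG" => (e, jL, nL, aL ++ [(pos, e)])
    | _ => (e, jL, nL, aL)

def parse_read_struct_alt (input_string : String) : List (String × List (Int × Int)) :=
  match (pvRunsB input_string.toList).foldl pvStepB (0, [], [], []) with
  | (_, jL, nL, aL) => [("J", jL), ("N", nL), ("ATCG", aL)]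

-- ===== PRECONDITION & SPEC =====
def Spec_parse_read_struct (input_string : String) (out : List (String × List (Int × Int))) : Prop := out = parse_read_struct_alt input_string
instance (input_string : String) (out : List (String × List (Int × Int))) : Decidable (Spec_parse_read_struct input_string out) := by unfold Spec_parse_read_struct; infer_instance

-- ===== CLAIM (what is proved, stated in full; the proofs are below) =====
def Claim_equal_parse_read_struct : Prop := ∀ (input_string : String), Dom_parse_read_struct input_string → Spec_parse_read_struct input_string (parse_read_struct input_string)

-- ===== LEMMAS AND PROOFS =====

lemma pvLoopA_cons (st : pvAState) (i : Int) (c : Char) (cs : List Char) :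
    pvLoopA st i (c :: cs) = pvLoopA (pvStepA st i c) (i + 1) cs := rfl

lemma pvLoopA_append (st : pvAState) (i : Int) (xs ys : List Char) :
    pvLoopA st i (xs ++ ys) = pvLoopA (pvLoopA st i xs) (i + (xs.length : Int)) ys := by
  induction xs generalizing st i with
  | nil => simp [pvLoopA]
  | cons c cs ih =>
    simp only [List.cons_append, pvLoopA, ih, List.length_cons]
    congr 1
    push_cast
    ring

lemma pvClassify_range (c : Char) (s : String) (h : pvClassify c = some s) :
    s = "J" ∨ s = "N" ∨ s = "ATCG" := by
  unfold pvClassify at h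
  split_ifs at h <;> simp_all

-- a character whose class is none leaves a 'no open interval' state untouched
lemma pvStepA_none_none (jL nL aL : List (Int × Int)) (i : Int) (c : Char)
    (h : pvClassify c = none) : pvStepA (jL, nL, aL, none) i c = (jL, nL, aL, none) := by
  unfold pvClassify at h
  split_ifs at h <;> unfold pvStepA <;> simp_all

-- a character whose class is some s opens interval (s, i) from a 'no open interval' state
lemma pvStepA_none_some (jL nL aL : List (Int × Int)) (i : Int) (c : Char) (s : String)
    (h : pvClassify c = some s) : pvStepA (jL, nL, aL, none) i c = (jL, nL, aL, some (s, i)) := by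
  rcases pvClassify_range c s h with rfl | rfl | rfl <;>
  · unfold pvClassify at h
    split_ifs at h <;> unfold pvStepA <;> simp_all

-- a character of the same class as the open interval is a no-op
lemma pvStepA_same (jL nL aL : List (Int × Int)) (i st0 : Int) (c : Char) (s : String)
    (h : pvClassify c = some s) :
    pvStepA (jL, nL, aL, some (s, st0)) i c = (jL, nL, aL, some (s, st0)) := by
  rcases pvClassify_range c s h with rfl | rfl | rfl <;>
    (unfold pvClassify at h; split_ifs at h <;> unfold pvStepA <;> simp_all)

-- closing the open interval of class s at position i into the right list
def pvCloseS (s : String) (st0 i : Int) (jL nL aL : List (Int × Int)) :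
    List (Int × Int) × List (Int × Int) × List (Int × Int) :=
  if s = "J" then (jL ++ [(st0, i)], nL, aL)
  else if s = "N" then (jL, nL ++ [(st0, i)], aL)
  else (jL, nL, aL ++ [(st0, i)])

lemma pvLoopA_close (jL nL aL : List (Int × Int)) (st0 : Int) (s : String)
    (hs : s = "J" ∨ s = "N" ∨ s = "ATCG") (c' : Char) (rs : List Char)
    (h : pvClassify c' ≠ some s) (i : Int) :
    pvLoopA (jL, nL, aL, some (s, st0)) i (c' :: rs) =
      pvLoopA ((pvCloseS s st0 i jL nL aL).1, (pvCloseS s st0 i jL nL aL).2.1,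
               (pvCloseS s st0 i jL nL aL).2.2, none) i (c' :: rs) := by
  rw [pvLoopA_cons, pvLoopA_cons]
  congr 1
  unfold pvClassify at h
  rcases hs with rfl | rfl | rfl <;>
    (unfold pvStepA pvCloseS; split_ifs at h ⊢ <;> simp_all)

lemma pvFlushA_some (jL nL aL : List (Int × Int)) (st0 n : Int) (s : String)
    (hs : s = "J" ∨ s = "N" ∨ s = "ATCG") :
    pvFlushA (jL, nL, aL, some (s, st0)) n =
      ((pvCloseS s st0 n jL nL aL).1, (pvCloseS s st0 n jL nL aL).2.1,
       (pvCloseS s st0 n jL nL aL).2.2) := by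
  unfold pvFlushA pvCloseS
  rcases hs with rfl | rfl | rfl <;> simp

lemma pvStepB_none (pos : Int) (jL nL aL : List (Int × Int)) (k : Nat) :
    pvStepB (pos, jL, nL, aL) (none, k) = (pos + (k : Int), jL, nL, aL) := rfl

lemma pvStepB_some (pos : Int) (jL nL aL : List (Int × Int)) (k : Nat) (s : String)
    (hs : s = "J" ∨ s = "N" ∨ s = "ATCG") :
    pvStepB (pos, jL, nL, aL) (some s, k) =
      (pos + (k : Int), pvCloseS s pos (pos + (k : Int)) jL nL aL) := by
  rcases hs with rfl | rfl | rfl <;> rfl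

-- a block of none-class characters is skipped with no state change
lemma pvLoopA_block_none (xs : List Char) (jL nL aL : List (Int × Int)) (i : Int)
    (h : ∀ c ∈ xs, pvClassify c = none) :
    pvLoopA (jL, nL, aL, none) i xs = (jL, nL, aL, none) := by
  induction xs generalizing i with
  | nil => rfl
  | cons c cs ih =>
    rw [pvLoopA_cons, pvStepA_none_none _ _ _ _ _ (h c (by simp))]
    exact ih _ (fun d hd => h d (by simp [hd]))

-- a block of same-class characters leaves the open interval untouched
lemma pvLoopA_block_same (xs : List Char) (jL nL aL : List (Int × Int)) (i st0 : Int) (s : String)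
    (h : ∀ c ∈ xs, pvClassify c = some s) :
    pvLoopA (jL, nL, aL, some (s, st0)) i xs = (jL, nL, aL, some (s, st0)) := by
  induction xs generalizing i with
  | nil => rfl
  | cons c cs ih =>
    rw [pvLoopA_cons, pvStepA_same _ _ _ _ _ _ _ (h c (by simp))]
    exact ih _ (fun d hd => h d (by simp [hd]))

-- MAIN INVARIANT: B's run-by-run fold computes A's char-by-char loop followed by the final flush
lemma pvMain : ∀ (cs : List Char) (i : Int) (jL nL aL : List (Int × Int)),
    (pvRunsB cs).foldl pvStepB (i, jL, nL, aL) =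
      (i + (cs.length : Int),
       pvFlushA (pvLoopA (jL, nL, aL, none) i cs) (i + (cs.length : Int))) := by
  intro cs
  induction cs using pvRunsB.induct with
  | case1 => intro i jL nL aL; simp [pvRunsB, pvLoopA, pvFlushA]
  | case2 c cs ih =>
    intro i jL nL aL
    rw [pvRunsB]
    simp only [List.foldl_cons]
    cases hc : pvClassify c with
    | none =>
      rw [hc] at ih
      set pre := cs.takeWhile (fun d => pvClassify d == (none : Option String)) with hpre
      set rest := cs.dropWhile (fun d => pvClassify d == (none : Option String)) with hrest
      have hsplit : pre ++ rest = cs := List.takeWhile_append_dropWhile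
      have hpremem : ∀ d ∈ pre, pvClassify d = none := by
        intro d hd
        have := List.mem_takeWhile_imp hd
        simpa using this
      have hlen : cs.length = pre.length + rest.length := by
        rw [← hsplit, List.length_append]
      have hdecomp : c :: cs = (c :: pre) ++ rest := by simp [hsplit]
      rw [hdecomp, pvLoopA_append]
      have hblock : pvLoopA ((jL, nL, aL, none) : pvAState) i (c :: pre) = (jL, nL, aL, none) := by
        apply pvLoopA_block_none
        intro d hd
        rcases List.mem_cons.mp hd with rfl | hd'
        · exact hc
        · exact hpremem d hd'
      rw [hblock, pvStepB_none, ih]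
      have e2 : i + ((pre.length + 1 : Nat) : Int) = i + (((c :: pre).length : Nat) : Int) := by
        simp only [List.length_cons]
      rw [e2]
      have e1 : i + (((c :: pre).length : Nat) : Int) + (rest.length : Int)
          = i + (((c :: pre) ++ rest).length : Int) := by
        simp only [List.length_cons, List.length_append]
        push_cast
        ring
      rw [e1]
    | some s =>
      have hs3 := pvClassify_range c s hc
      rw [hc] at ih
      set pre := cs.takeWhile (fun d => pvClassify d == some s) with hpre
      set rest := cs.dropWhile (fun d => pvClassify d == some s) with hrest
      have hsplit : pre ++ rest = cs := List.takeWhile_append_dropWhile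
      have hpremem : ∀ d ∈ pre, pvClassify d = some s := by
        intro d hd
        have := List.mem_takeWhile_imp hd
        simpa using this
      have hlen : cs.length = pre.length + rest.length := by
        rw [← hsplit, List.length_append]
      have hdecomp : c :: cs = (c :: pre) ++ rest := by simp [hsplit]
      rw [hdecomp, pvLoopA_append]
      have hopen : pvLoopA ((jL, nL, aL, none) : pvAState) i (c :: pre)
          = (jL, nL, aL, some (s, i)) := by
        rw [pvLoopA_cons, pvStepA_none_some _ _ _ _ _ _ hc]
        exact pvLoopA_block_same _ _ _ _ _ _ _ hpremem
      rw [hopen, pvStepB_some _ _ _ _ _ _ hs3]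
      have e2 : i + ((pre.length + 1 : Nat) : Int) = i + (((c :: pre).length : Nat) : Int) := by
        simp only [List.length_cons]
      rw [e2]
      cases hr : rest with
      | nil =>
        rw [hr] at hlen
        simp only [pvRunsB, List.foldl_nil, pvLoopA]
        rw [pvFlushA_some _ _ _ _ _ _ hs3]
        have e4 : i + (((c :: pre).length : Nat) : Int)
            = i + (((c :: pre) ++ ([] : List Char)).length : Int) := by
          simp
        rw [e4]
      | cons c' rs =>
        have hc' : pvClassify c' ≠ some s := by
          have hhead := List.head?_dropWhile_not (fun d => pvClassify d == some s) cs
          rw [← hrest, hr] at hhead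
          simpa using hhead
        rw [hr] at ih hlen
        rw [pvLoopA_close jL nL aL i s hs3 c' rs hc' (i + (((c :: pre).length : Nat) : Int))]
        rcases hC : pvCloseS s i (i + (((c :: pre).length : Nat) : Int)) jL nL aL
          with ⟨jL', nL', aL'⟩
        rw [ih]
        have e3 : i + (((c :: pre).length : Nat) : Int) + (((c' :: rs).length : Nat) : Int)
            = i + ((((c :: pre) ++ (c' :: rs)).length : Nat) : Int) := by
          simp only [List.length_cons, List.length_append]
          push_cast
          ring
        rw [e3]

-- ===== VERDICT (by name: the statement is the Claim_ definition above) =====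
theorem parse_read_struct_spec : Claim_equal_parse_read_struct := by
  intro s _
  unfold Spec_parse_read_struct parse_read_struct parse_read_struct_alt
  rw [pvMain]
  simp
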